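-- pv_equiv track=rewrite | github.com/enjoydarts/sifto | worker/app/services/youtube_extract_service.py | _language_rank
-- ===== SOURCE A (Python) =====
-- _LANGUAGE_PREFERENCE = [
--     "ja",
--     "ja-jp",
--     "en",
--     "en-us",
-- ]
--
-- def _language_rank(lang: str) -> int | None:
--     normalized = (lang or "").strip().lower()
--     if not normalized:
--         return None
--     for index, prefix in enumerate(_LANGUAGE_PREFERENCE):
--         if normalized == prefix or normalized.startswith(prefix + "-"):
--             return index
--     return None
-- ===== SOURCE B (Python) =====
-- _LANGUAGE_PREFERENCE = [
--     "ja",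
--     "ja-jp",
--     "en",
--     "en-us",
-- ]
--
-- def _build_rank_table():
--     table = {}
--     for index, prefix in enumerate(_LANGUAGE_PREFERENCE):
--         key = prefix.split("-")[0]
--         if key not in table:
--             table[key] = index
--     return table
--
-- _RANK_TABLE = _build_rank_table()
--
-- def _language_rank(lang):
--     normalized = (lang or "").strip().lower()
--     if not normalized:
--         return None
--     return _RANK_TABLE.get(normalized.split("-")[0])
-- ===== Notes on version B (the rewrite author's own statement) =====
-- stated objective: idiomatic
-- what changed: Replaces the per-call linear scan of the preference list with exact/startswith tests by a first-wins lookup table built once from each prefix's primary subtag, so the body is a single dict lookup on the primary subtag of the normalized string.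
import Mathlib
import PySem

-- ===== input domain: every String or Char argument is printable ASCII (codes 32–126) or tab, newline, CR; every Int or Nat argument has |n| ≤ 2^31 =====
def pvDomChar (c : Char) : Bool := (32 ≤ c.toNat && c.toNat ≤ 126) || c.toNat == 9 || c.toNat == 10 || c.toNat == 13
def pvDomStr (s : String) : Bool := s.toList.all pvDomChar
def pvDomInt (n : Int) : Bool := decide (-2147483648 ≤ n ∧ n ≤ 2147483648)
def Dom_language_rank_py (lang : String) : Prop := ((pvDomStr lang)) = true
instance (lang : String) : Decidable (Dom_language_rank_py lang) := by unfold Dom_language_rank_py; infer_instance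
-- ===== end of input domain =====

-- B replaces A's per-call scan of the preference list (exact match / startswith tests)
-- by a first-wins primary-subtag lookup table built once; return values proven identical.


-- shared module constant _LANGUAGE_PREFERENCE
def pyLanguagePreference : List String := ["ja", "ja-jp", "en", "en-us"]

-- ===== PORT A =====
-- the 'for index, prefix in enumerate(...)' loop with its early return
def langRankLoopA (n : List Char) : List (Int × String) → Option Int
  | [] => none
  | (index, pfx) :: rest =>
      if n = pfx.toList ∨ PySem.Chars.startswith n (pfx.toList ++ ['-']) = true then some index
      else langRankLoopA n rest

def language_rank_py (lang : String) : Option Int :=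
  let normalized := PySem.Chars.lower (PySem.Chars.strip lang.toList)
  if normalized = [] then none
  else langRankLoopA normalized (PySem.List.enumerate pyLanguagePreference 0)

-- ===== PORT B =====
-- _build_rank_table(): first-wins table keyed by prefix.split("-")[0]
def langRankTable : PySem.Dict (List Char) Int :=
  (PySem.List.enumerate pyLanguagePreference 0).foldl
    (fun t p =>
      let key := PySem.List.pyGetD (PySem.Chars.splitOn p.2.toList ['-']) 0 []
      if (t.get? key).isSome then t else t.insert key p.1)
    PySem.Dict.empty

def language_rank_py_alt (lang : String) : Option Int :=
  let normalized := PySem.Chars.lower (PySem.Chars.strip lang.toList)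
  if normalized = [] then none
  else langRankTable.get? (PySem.List.pyGetD (PySem.Chars.splitOn normalized ['-']) 0 [])

-- ===== PRECONDITION & SPEC =====
def Spec_language_rank_py (lang : String) (out : Option Int) : Prop := out = language_rank_py_alt lang
instance (lang : String) (out : Option Int) : Decidable (Spec_language_rank_py lang out) := by unfold Spec_language_rank_py; infer_instance

-- ===== CLAIM (what is proved, stated in full; the proofs are below) =====
def Claim_equal_language_rank_py : Prop := ∀ (lang : String), Dom_language_rank_py lang → Spec_language_rank_py lang (language_rank_py lang)

-- ===== LEMMAS AND PROOFS =====

-- splitOn.go with an accumulator just prepends the reversed accumulator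
theorem splitOnGo_acc (fuel : Nat) (l cur : List Char) (accl : List (List Char)) :
    PySem.Chars.splitOn.go ['-'] fuel l cur accl
      = accl.reverse ++ PySem.Chars.splitOn.go ['-'] fuel l cur [] := by
  induction fuel generalizing l cur accl with
  | zero => simp [PySem.Chars.splitOn.go]
  | succ f ih =>
    cases l with
    | nil => simp [PySem.Chars.splitOn.go]
    | cons c rest =>
      by_cases h : (['-'].isPrefixOf (c :: rest)) = true
      · rw [PySem.Chars.splitOn.go, PySem.Chars.splitOn.go]
        simp only [h, if_true]
        rw [ih _ _ (cur.reverse :: accl), ih _ _ [cur.reverse]]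
        simp
      · rw [PySem.Chars.splitOn.go, PySem.Chars.splitOn.go]
        simp only [h, Bool.false_eq_true, if_false]
        exact ih _ _ _

-- first piece of s.split('-') is the longest dash-free prefix
theorem splitOnGo_head (fuel : Nat) (l cur : List Char) (h : l.length < fuel) :
    (PySem.Chars.splitOn.go ['-'] fuel l cur []).getD 0 []
      = cur.reverse ++ l.takeWhile (fun c => !(c == '-')) := by
  induction fuel generalizing l cur with
  | zero => omega
  | succ f ih =>
    cases l with
    | nil => simp [PySem.Chars.splitOn.go]
    | cons c rest =>
      by_cases hc : c = '-'
      · subst hc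
        rw [PySem.Chars.splitOn.go]
        simp only [List.isPrefixOf, beq_self_eq_true, Bool.true_and, if_pos]
        rw [splitOnGo_acc _ _ _ [cur.reverse]]
        simp
      · rw [PySem.Chars.splitOn.go]
        have hpf : (['-'].isPrefixOf (c :: rest)) = false := by
          simp [List.isPrefixOf]
          exact fun hh => hc hh.symm
        simp only [hpf, Bool.false_eq_true, if_false]
        rw [ih rest (c :: cur) (by simpa using Nat.lt_of_succ_lt_succ h)]
        simp [hc]

theorem splitOn_head (n : List Char) :
    PySem.List.pyGetD (PySem.Chars.splitOn n ['-']) 0 []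
      = n.takeWhile (fun c => !(c == '-')) := by
  rw [PySem.List.pyGetD_zero, PySem.Chars.splitOn,
      splitOnGo_head (n.length + 1) n [] (by omega)]
  rfl

-- B's table, evaluated
theorem table_get (p : List Char) :
    langRankTable.get? p
      = if p = ['j', 'a'] then some 0 else if p = ['e', 'n'] then some 2 else none := by
  have htab : langRankTable = PySem.Dict.mk [(['j', 'a'], 0), (['e', 'n'], 2)] := by decide
  rw [htab]
  simp only [PySem.Dict.get?, List.find?]
  by_cases h1 : p = ['j', 'a']
  · subst h1; simp
  · by_cases h2 : p = ['e', 'n']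
    · subst h2; simp
    · have b1 : ((['j', 'a'] : List Char) == p) = false := by
        simpa using fun hh => h1 hh.symm
      have b2 : ((['e', 'n'] : List Char) == p) = false := by
        simpa using fun hh => h2 hh.symm
      simp [b1, b2, h1, h2]

-- A's match test 'n == w or n.startswith(w + "-")' computes the primary subtag, for dash-free w
theorem match_iff (w n : List Char) (hw : '-' ∉ w) :
    (n = w ∨ (w ++ ['-']) <+: n) ↔ n.takeWhile (fun c => !(c == '-')) = w := by
  induction w generalizing n with
  | nil =>
    cases n with
    | nil => simp
    | cons c rest =>
      rw [List.takeWhile_cons]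
      by_cases hc : c = '-'
      · subst hc
        simp [List.cons_prefix_cons]
      · simp [List.cons_prefix_cons, hc, Ne.symm hc]
  | cons a w' ih =>
    have ha : a ≠ '-' := fun h => hw (h ▸ List.mem_cons_self)
    have hw' : '-' ∉ w' := fun h => hw (List.mem_cons_of_mem _ h)
    cases n with
    | nil => simp
    | cons c rest =>
      rw [List.takeWhile_cons]
      by_cases hc : c = '-'
      · subst hc
        simp [List.cons_prefix_cons, ha, Ne.symm ha]
      · have hb : (!(c == '-')) = true := by simp [hc]
        rw [hb, if_pos rfl, List.cons_append]
        simp only [List.cons_prefix_cons, List.cons.injEq]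
        rw [← ih rest hw']
        tauto

-- the two loop bodies agree on every normalized string
theorem core (n : List Char) :
    langRankLoopA n (PySem.List.enumerate pyLanguagePreference 0)
      = langRankTable.get? (PySem.List.pyGetD (PySem.Chars.splitOn n ['-']) 0 []) := by
  rw [splitOn_head, table_get]
  have henum : PySem.List.enumerate pyLanguagePreference 0
      = [((0 : Int), "ja"), (1, "ja-jp"), (2, "en"), (3, "en-us")] := by decide
  rw [henum]
  have mja := match_iff ['j', 'a'] n (by decide)
  have men := match_iff ['e', 'n'] n (by decide)
  simp only [langRankLoopA, PySem.Chars.startswith_iff,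
    show ("ja".toList : List Char) = ['j', 'a'] from rfl,
    show ("ja-jp".toList : List Char) = ['j', 'a', '-', 'j', 'p'] from rfl,
    show ("en".toList : List Char) = ['e', 'n'] from rfl,
    show ("en-us".toList : List Char) = ['e', 'n', '-', 'u', 's'] from rfl,
    List.cons_append, List.nil_append]
  by_cases h0 : n.takeWhile (fun c => !(c == '-')) = ['j', 'a']
  · rw [if_pos (by simpa using mja.mpr h0), if_pos h0]
  · have nc0 : ¬(n = ['j', 'a'] ∨ ['j', 'a', '-'] <+: n) := fun hh => h0 (mja.mp hh)
    have nc1 : ¬(n = ['j', 'a', '-', 'j', 'p'] ∨ ['j', 'a', '-', 'j', 'p', '-'] <+: n) := by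
      rintro (hh | hh)
      · exact nc0 (Or.inr (hh ▸ (by decide)))
      · exact nc0 (Or.inr (List.IsPrefix.trans (by decide) hh))
    rw [if_neg nc0, if_neg nc1, if_neg h0]
    by_cases h2 : n.takeWhile (fun c => !(c == '-')) = ['e', 'n']
    · rw [if_pos (by simpa using men.mpr h2), if_pos h2]
    · have nc2 : ¬(n = ['e', 'n'] ∨ ['e', 'n', '-'] <+: n) := fun hh => h2 (men.mp hh)
      have nc3 : ¬(n = ['e', 'n', '-', 'u', 's'] ∨ ['e', 'n', '-', 'u', 's', '-'] <+: n) := by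
        rintro (hh | hh)
        · exact nc2 (Or.inr (hh ▸ (by decide)))
        · exact nc2 (Or.inr (List.IsPrefix.trans (by decide) hh))
      rw [if_neg nc2, if_neg nc3, if_neg h2]

-- ===== VERDICT (by name: the statement is the Claim_ definition above) =====
theorem language_rank_py_spec : Claim_equal_language_rank_py := by
  intro lang _
  unfold Spec_language_rank_py language_rank_py language_rank_py_alt
  by_cases h : PySem.Chars.lower (PySem.Chars.strip lang.toList) = []
  · simp [h]
  · simp only [h, if_false]
    exact core _
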